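-- pv_equiv track=rewrite | github.com/DanilGoose/tic-tac-toe-iti | game/board.py | get_pattern_transformations_cached
-- ===== SOURCE A (Python) =====
-- from typing import Optional, List, Tuple, Set
--
-- _transformation_cache = {}
--
-- _offset_cache = {}
--
-- def get_pattern_transformations_cached(cells_tuple: Tuple[Tuple[int, int], ...]) -> List[Tuple[Tuple[int, int], ...]]:
--     if cells_tuple in _transformation_cache:
--         return _transformation_cache[cells_tuple]
--
--     cells = list(cells_tuple)
--     seen = set()
--     transformations = []
--     current = cells
--
--     for _ in range(4):
--         key = _normalize_to_tuple(current)
--         if key not in seen: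
--             seen.add(key)
--             transformations.append(key)
--
--         current = [(-y, x) for x, y in current]
--
--     current = [(-x, y) for x, y in cells]
--     for _ in range(4):
--         key = _normalize_to_tuple(current)
--         if key not in seen:
--             seen.add(key)
--             transformations.append(key)
--
--         current = [(-y, x) for x, y in current]
--
--     _transformation_cache[cells_tuple] = transformations
--
--     for t in transformations:
--         if t not in _offset_cache:
--             _offset_cache[t] = set(t)
--
--     return transformations
--
-- def _normalize_to_tuple(cells: List[Tuple[int, int]]) -> Tuple[Tuple[int, int], ...]:
--     if not cells:
--         return tuple()
--     min_x = min(x for x, y in cells)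
--     min_y = min(y for x, y in cells)
--     return tuple(sorted((x - min_x, y - min_y) for x, y in cells))
-- ===== SOURCE B (Python) =====
-- from typing import List, Tuple
--
-- _transformation_cache = {}
--
-- _offset_cache = {}
--
--
-- def get_pattern_transformations_cached(cells_tuple: Tuple[Tuple[int, int], ...]) -> List[Tuple[Tuple[int, int], ...]]:
--     if cells_tuple in _transformation_cache:
--         return _transformation_cache[cells_tuple]
--
--     def orbit(cur, k=4):
--         """The k successive 90-degree rotation images of cur, recursively."""
--         if k == 0:
--             return []
--         return [cur] + orbit([(-y, x) for x, y in cur], k - 1)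
--
--     cells = list(cells_tuple)
--     candidates = orbit(cells) + orbit([(-x, y) for x, y in cells])
--     transformations = list(dict.fromkeys(map(_normalize_to_tuple, candidates)))
--
--     _transformation_cache[cells_tuple] = transformations
--     for t in transformations:
--         _offset_cache.setdefault(t, set(t))
--     return transformations
--
--
-- def _normalize_to_tuple(cells: List[Tuple[int, int]]) -> Tuple[Tuple[int, int], ...]:
--     if not cells:
--         return tuple()
--     min_x = min(x for x, y in cells)
--     min_y = min(y for x, y in cells)
--     return tuple(sorted((x - min_x, y - min_y) for x, y in cells))
-- ===== Notes on version B (the rewrite author's own statement) =====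
-- stated objective: alternative
-- what changed: Replaces A's two imperative loops that interleave rotation of a carried `current` list with a seen-set/append dedup by staged passes: a recursive `orbit` helper builds the two 4-element rotation chains, a map normalizes them, and `dict.fromkeys` does the order-preserving dedup (the offset cache is filled via setdefault).
import Mathlib
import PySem

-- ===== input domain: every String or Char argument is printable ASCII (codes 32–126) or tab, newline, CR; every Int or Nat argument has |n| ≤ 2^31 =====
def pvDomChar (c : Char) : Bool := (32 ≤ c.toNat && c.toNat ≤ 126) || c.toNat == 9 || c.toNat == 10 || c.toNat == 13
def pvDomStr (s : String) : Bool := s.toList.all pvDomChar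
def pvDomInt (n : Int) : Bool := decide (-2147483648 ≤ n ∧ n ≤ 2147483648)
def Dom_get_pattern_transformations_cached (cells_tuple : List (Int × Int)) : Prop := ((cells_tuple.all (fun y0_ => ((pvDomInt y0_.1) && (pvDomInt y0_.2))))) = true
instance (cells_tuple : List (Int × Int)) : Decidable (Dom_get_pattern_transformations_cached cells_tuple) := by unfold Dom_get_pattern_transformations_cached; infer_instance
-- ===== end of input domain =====

-- B replaces A's two imperative loops (carried `current` list, interleaved seen-set dedup)
-- with staged passes: a recursive orbit of the 4 rotations, a map with _normalize_to_tuple,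
-- and dict.fromkeys for the order-preserving dedup (objective: alternative decomposition).
-- Both Pythons also write the same module-level caches; the equivalence proved here is about
-- the return value, with the global caches in their initial empty state (on which the
-- early cache-lookup branch never fires).


-- ===== PORT A =====
-- _normalize_to_tuple, identical helper in both Python sources (shared by both ports)
def pvNormalize (cells : List (Int × Int)) : List (Int × Int) :=
  if cells = [] then []
  else
    let min_x := (PySem.List.min? (cells.map (fun p => p.1)) (fun v => v)).getD 0
    let min_y := (PySem.List.min? (cells.map (fun p => p.2)) (fun v => v)).getD 0
    PySem.List.sorted2 (cells.map (fun p => (p.1 - min_x, p.2 - min_y))) (fun p => p.1) (fun p => p.2)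

-- A's 'if key not in seen: seen.add(key); transformations.append(key)' block
def pvDedupAdd (st : PySem.Set (List (Int × Int)) × List (List (Int × Int)))
    (key : List (Int × Int)) : PySem.Set (List (Int × Int)) × List (List (Int × Int)) :=
  if st.1.contains key then st else (st.1.add key, st.2 ++ [key])

-- current = [(-y, x) for x, y in current]
def pvRot (p : Int × Int) : Int × Int := (-p.2, p.1)

def get_pattern_transformations_cached (cells_tuple : List (Int × Int)) : List (List (Int × Int)) :=
  -- the global caches start empty, so the early-return lookup never fires; the cache writes are side effects
  let cells := cells_tuple
  let step := fun (st : (PySem.Set (List (Int × Int)) × List (List (Int × Int))) × List (Int × Int)) (_ : Int) =>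
    (pvDedupAdd st.1 (pvNormalize st.2), st.2.map pvRot)
  let st1 := (PySem.List.pyRange 0 4).foldl step ((PySem.Set.ofList [], []), cells)
  let st2 := (PySem.List.pyRange 0 4).foldl step (st1.1, cells.map (fun p => (-p.1, p.2)))
  st2.1.2

-- ===== PORT B =====
-- Source B's recursive `orbit(cur, k)`: the k successive rotation images of cur
def pvOrbit (cur : List (Int × Int)) : Nat → List (List (Int × Int))
  | 0 => []
  | k + 1 => [cur] ++ pvOrbit (cur.map (fun p => (-p.2, p.1))) k

def get_pattern_transformations_cached_alt (cells_tuple : List (Int × Int)) : List (List (Int × Int)) :=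
  let cells := cells_tuple
  let candidates := pvOrbit cells 4 ++ pvOrbit (cells.map (fun p => (-p.1, p.2))) 4
  PySem.List.dedup (candidates.map pvNormalize)

-- ===== PRECONDITION & SPEC =====
def Spec_get_pattern_transformations_cached (cells_tuple : List (Int × Int)) (out : List (List (Int × Int))) : Prop := out = get_pattern_transformations_cached_alt cells_tuple
instance (cells_tuple : List (Int × Int)) (out : List (List (Int × Int))) : Decidable (Spec_get_pattern_transformations_cached cells_tuple out) := by unfold Spec_get_pattern_transformations_cached; infer_instance

-- ===== CLAIM (what is proved, stated in full; the proofs are below) =====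
def Claim_equal_get_pattern_transformations_cached : Prop := ∀ (cells_tuple : List (Int × Int)), Dom_get_pattern_transformations_cached cells_tuple → Spec_get_pattern_transformations_cached cells_tuple (get_pattern_transformations_cached cells_tuple)

-- ===== LEMMAS AND PROOFS =====
-- A's seen-set/append fold keeps its two state components equal, and the seen
-- component evolves exactly like PySem.Set.add; hence the output component of the
-- fold is Set.ofList = dedup of the key list.
theorem pv_dedupAdd_fold (keys : List (List (Int × Int))) (s : PySem.Set (List (Int × Int))) :
    keys.foldl pvDedupAdd (s, s) = (keys.foldl PySem.Set.add s, keys.foldl PySem.Set.add s) := by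
  induction keys generalizing s with
  | nil => rfl
  | cons k t ih =>
    by_cases h : k ∈ s <;>
      simp [List.foldl, pvDedupAdd, PySem.Set.add, h, ih]

-- ===== VERDICT (by name: the statement is the Claim_ definition above) =====
theorem get_pattern_transformations_cached_spec : Claim_equal_get_pattern_transformations_cached := by
  intro cells _
  unfold Spec_get_pattern_transformations_cached
  simp only [get_pattern_transformations_cached, get_pattern_transformations_cached_alt]
  rw [show PySem.List.pyRange 0 4 = [0, 1, 2, 3] by decide]
  simp only [List.foldl, pvOrbit, List.map, List.cons_append, List.nil_append,
    PySem.List.dedup_eq_ofList, PySem.Set.ofList_eq_foldl]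
  -- the A side is the second component of one combined fold over the eight keys
  have h := pv_dedupAdd_fold
    [pvNormalize cells,
     pvNormalize (cells.map pvRot),
     pvNormalize ((cells.map pvRot).map pvRot),
     pvNormalize (((cells.map pvRot).map pvRot).map pvRot),
     pvNormalize (cells.map (fun p => (-p.1, p.2))),
     pvNormalize ((cells.map (fun p => (-p.1, p.2))).map pvRot),
     pvNormalize (((cells.map (fun p => (-p.1, p.2))).map pvRot).map pvRot),
     pvNormalize ((((cells.map (fun p => (-p.1, p.2))).map pvRot).map pvRot).map pvRot)] []
  simp only [List.foldl] at h
  rw [congrArg Prod.snd h]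
  simp only [show (fun p : Int × Int => (-p.2, p.1)) = pvRot from rfl]
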